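-- pv_equiv track=rewrite | github.com/clivepato93/Edabit_challenges | Hard/unique_styles.py | unique_styles
-- ===== SOURCE A (Python) =====
-- def unique_styles(a):
--     e=[]
--     a=[i.split(",")for i in a]
--     for row in a:
--         for c in row:
--             if c not in e:
--                 e.append(c)
--     return len(e)
-- ===== SOURCE B (Python) =====
-- def unique_styles(a):
--     flat = sorted(s for row in a for s in row.split(","))
--     count = 0
--     prev = None
--     for s in flat:
--         if s != prev:
--             count += 1
--         prev = s
--     return count
-- ===== Notes on version B (the rewrite author's own statement) =====
-- stated objective: faster
-- what changed: Replaces the quadratic membership-scan accumulator list with a flatten-then-sort pass that counts a style whenever it differs from its sorted predecessor.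
import Mathlib
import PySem

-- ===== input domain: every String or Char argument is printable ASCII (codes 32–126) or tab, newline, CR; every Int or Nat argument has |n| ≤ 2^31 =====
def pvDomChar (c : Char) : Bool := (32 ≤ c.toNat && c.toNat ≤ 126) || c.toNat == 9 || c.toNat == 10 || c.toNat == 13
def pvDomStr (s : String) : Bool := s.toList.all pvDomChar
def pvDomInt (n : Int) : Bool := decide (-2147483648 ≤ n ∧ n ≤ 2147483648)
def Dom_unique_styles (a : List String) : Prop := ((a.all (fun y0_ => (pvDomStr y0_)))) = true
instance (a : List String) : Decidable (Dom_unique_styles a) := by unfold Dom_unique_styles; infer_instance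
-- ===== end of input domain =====

-- B flattens the styles, sorts them, and counts changes of value in one scan, instead of
-- A's accumulator list with a linear membership test per style (alternative decomposition).


-- shared primitive: i.split(",") — sep is the literal "," ≠ "", so PySem.Str.split? always returns some
def pySplitComma (i : String) : List String := (PySem.Str.split? i ",").getD []

-- ===== PORT A =====
def unique_styles (a : List String) : Int :=
  let a2 := a.map (fun i => pySplitComma i)
  let e := a2.foldl (fun e row =>
    row.foldl (fun e c => if c ∈ e then e else e ++ [c]) e) []
  (e.length : Int)

-- ===== PORT B =====
-- one scan over the sorted flat list: count += 1 whenever the current style differs from prev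
def uniqueScan : Option String → Int → List String → Int
  | _, count, [] => count
  | prev, count, s :: rest =>
      uniqueScan (some s) (if some s = prev then count else count + 1) rest

def unique_styles_alt (a : List String) : Int :=
  let flat := PySem.List.sorted (a.flatMap (fun row => pySplitComma row)) (fun x => x) false
  uniqueScan none 0 flat

-- ===== PRECONDITION & SPEC =====
def Spec_unique_styles (a : List String) (out : Int) : Prop := out = unique_styles_alt a
instance (a : List String) (out : Int) : Decidable (Spec_unique_styles a out) := by unfold Spec_unique_styles; infer_instance

-- ===== CLAIM (what is proved, stated in full; the proofs are below) =====
def Claim_equal_unique_styles : Prop := ∀ (a : List String), Dom_unique_styles a → Spec_unique_styles a (unique_styles a)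

-- ===== LEMMAS AND PROOFS =====

theorem card_insert_erase {α : Type} [DecidableEq α] (x : α) (s : Finset α) :
    (insert x s).card = (s.erase x).card + 1 := by
  by_cases h : x ∈ s
  · rw [Finset.card_insert_of_mem h, Finset.card_erase_add_one h]
  · rw [Finset.card_insert_of_notMem h, Finset.erase_eq_of_notMem h]

-- A's inner step keeps the accumulator duplicate-free and accumulates the members
theorem foldl_mem_append (l e : List String) (he : e.Nodup) :
    (l.foldl (fun e c => if c ∈ e then e else e ++ [c]) e).Nodup ∧
    (l.foldl (fun e c => if c ∈ e then e else e ++ [c]) e).toFinset = e.toFinset ∪ l.toFinset := by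
  induction l generalizing e with
  | nil => simp [he]
  | cons x xs ih =>
    simp only [List.foldl_cons]
    by_cases hx : x ∈ e
    · rcases ih e he with ⟨h1, h2⟩
      simp only [if_pos hx]
      refine ⟨h1, ?_⟩
      rw [h2, List.toFinset_cons]
      ext y
      simp only [Finset.mem_union, Finset.mem_insert, List.mem_toFinset]
      constructor
      · rintro (hy | hy)
        · exact Or.inl hy
        · exact Or.inr (Or.inr hy)
      · rintro (hy | rfl | hy)
        · exact Or.inl hy
        · exact Or.inl hx
        · exact Or.inr hy
    · have hnd : (e ++ [x]).Nodup := by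
        rw [List.nodup_append]
        refine ⟨he, List.nodup_singleton x, ?_⟩
        intro a ha b hb
        rw [List.mem_singleton] at hb
        subst hb
        exact fun hba => hx (hba ▸ ha)
      rcases ih (e ++ [x]) hnd with ⟨h1, h2⟩
      simp only [if_neg hx]
      refine ⟨h1, ?_⟩
      rw [h2, List.toFinset_cons]
      ext y
      simp only [Finset.mem_union, Finset.mem_insert, List.mem_toFinset, List.toFinset_append,
        List.toFinset_cons, List.toFinset_nil, insert_empty_eq, Finset.mem_singleton]
      tauto

-- the scan on a sorted tail counts the distinct values other than the sentinel
theorem uniqueScan_sorted (l : List String) (v : String) (c : Int)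
    (h : (v :: l).Pairwise (· ≤ ·)) :
    uniqueScan (some v) c l = c + ((l.toFinset).erase v).card := by
  induction l generalizing v c with
  | nil => simp [uniqueScan]
  | cons x xs ih =>
    rcases List.pairwise_cons.mp h with ⟨hv, hx⟩
    by_cases hxv : x = v
    · subst hxv
      have hs : uniqueScan (some x) c (x :: xs) = uniqueScan (some x) c xs := by
        simp [uniqueScan]
      rw [hs, ih x c hx]
      congr 1
      rw [List.toFinset_cons, Finset.erase_insert_eq_erase]
    · have hlt : v < x := lt_of_le_of_ne (hv x (by simp)) (fun hh => hxv hh.symm)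
      have hvnot : v ∉ (x :: xs).toFinset := by
        simp only [List.mem_toFinset, List.mem_cons]
        rintro (rfl | hmem)
        · exact absurd rfl (ne_of_lt hlt)
        · exact absurd (lt_of_lt_of_le hlt ((List.pairwise_cons.mp hx).1 v hmem)) (lt_irrefl v)
      have step : uniqueScan (some v) c (x :: xs) = uniqueScan (some x) (c + 1) xs := by
        simp [uniqueScan, hxv]
      rw [step, ih x (c + 1) hx, Finset.erase_eq_of_notMem hvnot, List.toFinset_cons,
        card_insert_erase]
      push_cast
      ring

-- the full scan of a sorted list counts its distinct values
theorem uniqueScan_card (l : List String) (h : l.Pairwise (· ≤ ·)) :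
    uniqueScan none 0 l = (l.toFinset.card : Int) := by
  cases l with
  | nil => simp [uniqueScan]
  | cons v t =>
    have hs : uniqueScan none 0 (v :: t) = uniqueScan (some v) 1 t := by simp [uniqueScan]
    rw [hs, uniqueScan_sorted t v 1 h, List.toFinset_cons, card_insert_erase]
    push_cast
    ring

-- ===== VERDICT (by name: the statement is the Claim_ definition above) =====
theorem unique_styles_spec : Claim_equal_unique_styles := by
  intro a _
  unfold Spec_unique_styles unique_styles unique_styles_alt
  dsimp only
  set f : String → List String := fun i => pySplitComma i with hfdef
  set flat : List String := a.flatMap f with hflat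
  have hA : (a.map f).foldl (fun e row =>
      row.foldl (fun e c => if c ∈ e then e else e ++ [c]) e) [] =
      flat.foldl (fun e c => if c ∈ e then e else e ++ [c]) [] := by
    rw [hflat, List.flatMap_def, List.foldl_flatten]
  rcases foldl_mem_append flat [] List.nodup_nil with ⟨h1, h2⟩
  have hAlen : ((flat.foldl (fun e c => if c ∈ e then e else e ++ [c]) []).length : Int) =
      (flat.toFinset.card : Int) := by
    rw [← List.toFinset_card_of_nodup h1, h2]
    simp
  have hpair : (PySem.List.sorted flat (fun x => x) false).Pairwise (· ≤ ·) :=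
    PySem.List.sorted_pairwise flat (fun x => x)
  have hperm : (PySem.List.sorted flat (fun x => x) false).Perm flat :=
    PySem.List.sorted_perm flat (fun x => x) false
  have htf : (PySem.List.sorted flat (fun x => x) false).toFinset = flat.toFinset :=
    Finset.ext (fun y => by simp only [List.mem_toFinset]; exact hperm.mem_iff)
  rw [hA, hAlen, uniqueScan_card _ hpair, htf]
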